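-- pv_equiv track=rewrite | github.com/ffyuanda/problems | src/ICS_33/in_lab_3/ile3helper.py | nth_for_m
-- ===== SOURCE A (Python) =====
-- def nth_for_m(iterable, n, m):
--     n_for_m = []
--     for i,v in enumerate(iterable,1):
--         if i in range(n,n+m):
--             n_for_m.append(v)
--         if i == n+m:
--             return n_for_m
--     return None
-- ===== SOURCE B (Python) =====
-- import itertools
--
-- def nth_for_m(iterable, n, m):
--     k = n + m
--     if k <= 0:
--         return None
--     head = list(itertools.islice(iterable, k))
--     if len(head) < k:
--         return None
--     return head[max(n - 1, 0):k - 1]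
-- ===== Notes on version B (the rewrite author's own statement) =====
-- stated objective: idiomatic
-- what changed: Replaces the single-pass enumerate loop with per-element range-membership test and early return by a build-prefix-then-slice decomposition: take the first n+m elements with islice, check the prefix is long enough, and slice out the 1-based window [n, n+m).
import Mathlib
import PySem

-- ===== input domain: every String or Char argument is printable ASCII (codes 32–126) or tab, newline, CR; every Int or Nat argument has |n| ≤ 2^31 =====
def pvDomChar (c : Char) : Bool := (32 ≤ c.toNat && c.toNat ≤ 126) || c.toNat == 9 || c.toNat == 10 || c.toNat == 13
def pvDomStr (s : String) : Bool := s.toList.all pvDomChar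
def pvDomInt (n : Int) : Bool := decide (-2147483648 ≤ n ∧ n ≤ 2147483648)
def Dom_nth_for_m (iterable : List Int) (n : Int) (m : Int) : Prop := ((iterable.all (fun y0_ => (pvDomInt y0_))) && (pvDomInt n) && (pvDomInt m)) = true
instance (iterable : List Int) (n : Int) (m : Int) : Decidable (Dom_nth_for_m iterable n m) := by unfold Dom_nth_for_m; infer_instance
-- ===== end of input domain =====

-- B replaces A's enumerate-loop with membership test and early return by a take-prefix, length-check, slice decomposition (idiomatic, same cost).


-- ===== PORT A =====
-- the for-loop with 1-based enumerate, membership test and early return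
def nth_for_m_go (l : List Int) (i : Int) (acc : List Int) (n : Int) (m : Int) : Option (List Int) :=
  match l with
  | [] => none
  | v :: rest =>
    let acc' := if n ≤ i ∧ i < n + m then acc ++ [v] else acc
    if i = n + m then some acc' else nth_for_m_go rest (i + 1) acc' n m

def nth_for_m (iterable : List Int) (n : Int) (m : Int) : Option (List Int) :=
  nth_for_m_go iterable 1 [] n m

-- ===== PORT B =====
def nth_for_m_alt (iterable : List Int) (n : Int) (m : Int) : Option (List Int) :=
  let k := n + m
  if k ≤ 0 then none
  else
    let head := iterable.take k.toNat        -- list(itertools.islice(iterable, k)), k > 0 here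
    if (head.length : Int) < k then none
    else some (PySem.List.slice head (some (max (n - 1) 0)) (some (k - 1)))

-- ===== PRECONDITION & SPEC =====
def Spec_nth_for_m (iterable : List Int) (n : Int) (m : Int) (out : Option (List Int)) : Prop := out = nth_for_m_alt iterable n m
instance (iterable : List Int) (n : Int) (m : Int) (out : Option (List Int)) : Decidable (Spec_nth_for_m iterable n m out) := by unfold Spec_nth_for_m; infer_instance

-- ===== CLAIM (what is proved, stated in full; the proofs are below) =====
def Claim_equal_nth_for_m : Prop := ∀ (iterable : List Int) (n : Int) (m : Int), Dom_nth_for_m iterable n m → Spec_nth_for_m iterable n m (nth_for_m iterable n m)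

-- ===== LEMMAS AND PROOFS =====

-- past the target position the loop can never hit i = n+m again
lemma nth_for_m_go_none (n m : Int) : ∀ (l : List Int) (i : Int) (acc : List Int),
    n + m < i → nth_for_m_go l i acc n m = none := by
  intro l
  induction l with
  | nil => intro i acc _; rfl
  | cons v rest ih =>
    intro i acc h
    simp only [nth_for_m_go]
    rw [if_neg (by omega : ¬ i = n + m)]
    exact ih (i + 1) _ (by omega)

-- loop invariant: from position i ≤ n+m with accumulator acc, the loop returns
-- none iff fewer than n+m-i+1 elements remain, else acc ++ the window slice
lemma nth_for_m_go_eq (n m : Int) : ∀ (l : List Int) (i : Int) (acc : List Int),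
    1 ≤ i → i ≤ n + m →
    nth_for_m_go l i acc n m =
      if (l.length : Int) < n + m - i + 1 then none
      else some (acc ++ (l.take (n + m - i).toNat).drop (n - i).toNat) := by
  intro l
  induction l with
  | nil =>
    intro i acc h1 h2
    simp only [nth_for_m_go, List.length_nil]
    rw [if_pos (by omega)]
  | cons v rest ih =>
    intro i acc h1 h2
    simp only [nth_for_m_go, List.length_cons]
    by_cases hend : i = n + m
    · have hnotin : ¬ (n ≤ i ∧ i < n + m) := by omega
      have hfalse : ¬ (((rest.length + 1 : ℕ) : Int) < n + m - i + 1) := by push_cast; omega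
      rw [if_neg hnotin, if_pos hend, if_neg hfalse]
      have ht : (n + m - i).toNat = 0 := by omega
      simp [ht]
    · rw [if_neg hend]
      by_cases hin : n ≤ i
      · have hcond : n ≤ i ∧ i < n + m := ⟨hin, by omega⟩
        rw [if_pos hcond, ih (i + 1) (acc ++ [v]) (by omega) (by omega)]
        by_cases hshort : (rest.length : Int) < n + m - (i + 1) + 1
        · have h2' : ((rest.length + 1 : ℕ) : Int) < n + m - i + 1 := by push_cast; omega
          rw [if_pos hshort, if_pos h2']
        · have h2' : ¬ (((rest.length + 1 : ℕ) : Int) < n + m - i + 1) := by push_cast; omega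
          rw [if_neg hshort, if_neg h2']
          have htk : (n + m - i).toNat = (n + m - (i + 1)).toNat + 1 := by omega
          have hd : (n - i).toNat = 0 := by omega
          have hd' : (n - (i + 1)).toNat = 0 := by omega
          simp [htk, hd, hd', List.take_succ_cons]
      · have hcond : ¬ (n ≤ i ∧ i < n + m) := by omega
        rw [if_neg hcond, ih (i + 1) acc (by omega) (by omega)]
        by_cases hshort : (rest.length : Int) < n + m - (i + 1) + 1
        · have h2' : ((rest.length + 1 : ℕ) : Int) < n + m - i + 1 := by push_cast; omega
          rw [if_pos hshort, if_pos h2']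
        · have h2' : ¬ (((rest.length + 1 : ℕ) : Int) < n + m - i + 1) := by push_cast; omega
          rw [if_neg hshort, if_neg h2']
          have htk : (n + m - i).toNat = (n + m - (i + 1)).toNat + 1 := by omega
          have hd : (n - i).toNat = (n - (i + 1)).toNat + 1 := by omega
          simp [htk, hd, List.take_succ_cons]

-- ===== VERDICT (by name: the statement is the Claim_ definition above) =====
theorem nth_for_m_spec : Claim_equal_nth_for_m := by
  intro l n m _
  unfold Spec_nth_for_m nth_for_m nth_for_m_alt
  by_cases hk : n + m ≤ 0
  · rw [nth_for_m_go_none n m l 1 [] (by omega)]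
    simp [hk]
  · rw [nth_for_m_go_eq n m l 1 [] (by omega) (by omega)]
    simp only [if_neg hk]
    by_cases hshort : (l.length : Int) < n + m
    · have hA : (l.length : Int) < n + m - 1 + 1 := by omega
      have hB : ((l.take (n + m).toNat).length : Int) < n + m := by
        rw [List.length_take, Nat.min_eq_right (by omega : l.length ≤ (n + m).toNat)]
        omega
      rw [if_pos hA, if_pos hB]
    · have hA : ¬ ((l.length : Int) < n + m - 1 + 1) := by omega
      have hB : ¬ (((l.take (n + m).toNat).length : Int) < n + m) := by
        rw [List.length_take, Nat.min_eq_left (by omega : (n + m).toNat ≤ l.length)]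
        omega
      rw [if_neg hA, if_neg hB]
      rw [PySem.List.slice_toNat _ (by omega) (by omega)]
      have hmax : (max (n - 1) 0).toNat = (n - 1).toNat := by omega
      rw [List.nil_append, hmax]
      congr 1
      rw [List.drop_take, List.drop_take, List.take_take]
      congr 1
      omega
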